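-- pv_equiv track=rewrite | github.com/jflessenkemper/AOE-3-DE-Legendary-Leaders-AI | tools/aoe3_automation/log_capture.py | _has_all_tokens
-- ===== SOURCE A (Python) =====
-- _REQUIRED_TOKENS: tuple[str, ...] = ("developer", "+ixsLog", "+cxsLog")
--
-- def _has_all_tokens(content: str) -> bool:
--     """Check that every required dev-mode token is present uncommented."""
--     # Strip line comments before checking.
--     active_lines: list[str] = []
--     for raw in content.splitlines():
--         stripped = raw.strip()
--         if not stripped or stripped.startswith("//"):
--             continue
--         active_lines.append(stripped)
--     active = "\n".join(active_lines)
--     return all(tok in active for tok in _REQUIRED_TOKENS)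
-- ===== SOURCE B (Python) =====
-- _REQUIRED_TOKENS: tuple[str, ...] = ("developer", "+ixsLog", "+cxsLog")
--
--
-- def _has_all_tokens(content: str) -> bool:
--     """Check that every required dev-mode token is present uncommented."""
--     # Single pass: per-line token flags, no joined string is ever built.
--     dev = ixs = cxs = False
--     for raw in content.splitlines():
--         stripped = raw.strip()
--         if not stripped or stripped.startswith("//"):
--             continue
--         dev = dev or "developer" in stripped
--         ixs = ixs or "+ixsLog" in stripped
--         cxs = cxs or "+cxsLog" in stripped
--     return dev and ixs and cxs
-- ===== Notes on version B (the rewrite author's own statement) =====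
-- stated objective: simpler
-- what changed: B checks each required token per stripped active line in one pass, keeping three boolean flags, instead of first accumulating the active lines, joining them into one string and then scanning that joined string for every token.
import Mathlib
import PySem

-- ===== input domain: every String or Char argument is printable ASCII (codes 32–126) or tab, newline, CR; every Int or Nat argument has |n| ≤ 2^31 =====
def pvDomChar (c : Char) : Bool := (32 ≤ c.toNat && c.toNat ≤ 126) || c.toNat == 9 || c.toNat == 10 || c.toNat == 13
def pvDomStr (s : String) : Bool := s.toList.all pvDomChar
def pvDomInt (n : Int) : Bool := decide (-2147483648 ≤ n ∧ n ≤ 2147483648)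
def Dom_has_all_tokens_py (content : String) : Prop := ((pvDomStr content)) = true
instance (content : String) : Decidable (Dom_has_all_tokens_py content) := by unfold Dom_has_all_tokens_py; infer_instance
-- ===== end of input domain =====

-- B checks each required token per stripped active line in one pass (three flags) instead of
-- joining the active lines into one string and scanning that; objective: simpler.

-- shared helper: the Python test 'not stripped or stripped.startswith("//")'
def pvSkip (stripped : String) : Bool :=
  PySem.Str.len stripped == 0 || PySem.Str.startswith stripped "//"

-- ===== PORT A =====
def has_all_tokens_py (content : String) : Bool :=
  let active_lines : List String :=
    (PySem.Str.splitlines content).foldl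
      (fun acc raw =>
        let stripped := PySem.Str.strip raw
        if pvSkip stripped then acc
        else acc ++ [stripped])
      []
  let active := PySem.Str.join "\n" active_lines
  (["developer", "+ixsLog", "+cxsLog"].all fun tok => PySem.Str.isIn tok active)

-- ===== PORT B =====
-- the loop body of Source B
def pvStepB (acc : Bool × Bool × Bool) (raw : String) : Bool × Bool × Bool :=
  let stripped := PySem.Str.strip raw
  if pvSkip stripped then acc
  else (acc.1 || PySem.Str.isIn "developer" stripped,
        acc.2.1 || PySem.Str.isIn "+ixsLog" stripped,
        acc.2.2 || PySem.Str.isIn "+cxsLog" stripped)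

def has_all_tokens_py_alt (content : String) : Bool :=
  let r := (PySem.Str.splitlines content).foldl pvStepB (false, false, false)
  r.1 && r.2.1 && r.2.2

-- ===== PRECONDITION & SPEC =====
def Spec_has_all_tokens_py (content : String) (out : Bool) : Prop := out = has_all_tokens_py_alt content
instance (content : String) (out : Bool) : Decidable (Spec_has_all_tokens_py content out) := by unfold Spec_has_all_tokens_py; infer_instance

-- ===== CLAIM (what is proved, stated in full; the proofs are below) =====
def Claim_equal_has_all_tokens_py : Prop := ∀ (content : String), Dom_has_all_tokens_py content → Spec_has_all_tokens_py content (has_all_tokens_py content)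

-- ===== LEMMAS AND PROOFS =====

-- the lines both loops keep
def pvKeep (raw : String) : Bool := !pvSkip (PySem.Str.strip raw)

theorem pv_prefix_of_notMem {α : Type} {c : α} :
    ∀ (cs l rest : List α), c ∉ cs → cs <+: l ++ c :: rest → cs <+: l := by
  intro cs
  induction cs with
  | nil => intro l rest _ _; exact List.nil_prefix
  | cons x cs' ih =>
    intro l rest hc h
    have hc' : c ∉ cs' := fun m => hc (List.mem_cons_of_mem _ m)
    have hxc : x ≠ c := fun e => hc (e ▸ List.mem_cons_self)
    cases l with
    | nil =>
      rcases List.prefix_cons_iff.mp h with h0 | ⟨t, ht, _⟩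
      · exact absurd h0 (by simp)
      · simp only [List.cons.injEq] at ht; exact absurd ht.1 hxc
    | cons a l' =>
      rcases List.prefix_cons_iff.mp h with h0 | ⟨t, ht, hp⟩
      · exact absurd h0 (by simp)
      · injection ht with h1 h2
        subst h1; subst h2
        exact List.cons_prefix_cons.mpr ⟨rfl, ih l' rest hc' hp⟩

theorem pv_infix_split {α : Type} {c : α} {cs rest : List α} (hc : c ∉ cs) :
    ∀ l, cs <:+: l ++ c :: rest → cs <:+: l ∨ cs <:+: rest := by
  intro l
  induction l with
  | nil =>
    intro h
    rcases List.infix_cons_iff.mp h with hp | hi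
    · have h0 : cs = [] := List.prefix_nil.mp (pv_prefix_of_notMem cs [] rest hc hp)
      exact Or.inl (h0 ▸ List.nil_infix)
    · exact Or.inr hi
  | cons a l' ih =>
    intro h
    rcases List.infix_cons_iff.mp h with hp | hi
    · exact Or.inl (pv_prefix_of_notMem cs (a :: l') rest hc hp).isInfix
    · rcases ih hi with h1 | h2
      · exact Or.inl (List.infix_append_of_infix_right (l₂ := [a]) h1)
      · exact Or.inr h2

theorem pv_isIn_append_nl {cs l J : List Char} (hc : '\n' ∉ cs) :
    PySem.Chars.isIn cs (l ++ '\n' :: J) = (PySem.Chars.isIn cs l || PySem.Chars.isIn cs J) := by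
  apply Bool.eq_iff_iff.mpr
  simp only [PySem.Chars.isIn_iff_infix, Bool.or_eq_true]
  constructor
  · exact pv_infix_split hc l
  · rintro (h | h)
    · exact h.trans List.infix_append_left
    · exact List.infix_append_of_infix_right (List.infix_append_of_infix_right (l₂ := ['\n']) h)

theorem pv_isIn_join {cs : List Char} (hne : cs ≠ []) (hc : '\n' ∉ cs) :
    ∀ ls : List (List Char),
      PySem.Chars.isIn cs (PySem.Chars.join ['\n'] ls) = ls.any (fun l => PySem.Chars.isIn cs l) := by
  intro ls
  induction ls with
  | nil =>
    simp only [PySem.Chars.join_nil, List.any_nil]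
    exact (PySem.Chars.isIn_eq_false_iff _ _).mpr (by simpa using hne)
  | cons l ls' ih =>
    cases ls' with
    | nil => simp [PySem.Chars.join_singleton]
    | cons l₂ r =>
      rw [PySem.Chars.join_cons_cons, List.append_assoc, List.singleton_append,
        pv_isIn_append_nl hc, ih]
      simp [List.any_cons]

theorem pv_foldA (lines : List String) (acc : List String) :
    lines.foldl
      (fun acc raw =>
        let stripped := PySem.Str.strip raw
        if pvSkip stripped then acc
        else acc ++ [stripped])
      acc = acc ++ (lines.filter pvKeep).map PySem.Str.strip := by
  induction lines generalizing acc with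
  | nil => simp
  | cons raw rest ih =>
    rw [List.foldl_cons, ih]
    simp only [List.filter_cons, pvKeep]
    by_cases h : pvSkip (PySem.Str.strip raw) = true
    · simp [h]
    · simp only [Bool.not_eq_true] at h
      simp [h]

theorem pv_foldB (lines : List String) (acc : Bool × Bool × Bool) :
    lines.foldl pvStepB acc =
      (acc.1 || lines.any (fun raw => pvKeep raw && PySem.Str.isIn "developer" (PySem.Str.strip raw)),
       acc.2.1 || lines.any (fun raw => pvKeep raw && PySem.Str.isIn "+ixsLog" (PySem.Str.strip raw)),
       acc.2.2 || lines.any (fun raw => pvKeep raw && PySem.Str.isIn "+cxsLog" (PySem.Str.strip raw))) := by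
  induction lines generalizing acc with
  | nil => simp
  | cons raw rest ih =>
    rw [List.foldl_cons, ih]
    simp only [List.any_cons, pvStepB, pvKeep]
    by_cases h : pvSkip (PySem.Str.strip raw) = true
    · simp [h]
    · simp only [Bool.not_eq_true] at h
      simp [h, Bool.or_assoc]

-- per token: A's check on the joined string equals B's per-line any
theorem pv_tok (lines : List String) (tok : String)
    (hne : tok.toList ≠ []) (hc : '\n' ∉ tok.toList) :
    PySem.Str.isIn tok (PySem.Str.join "\n" ((lines.filter pvKeep).map PySem.Str.strip)) =
      lines.any (fun raw => pvKeep raw && PySem.Str.isIn tok (PySem.Str.strip raw)) := by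
  rw [PySem.Str.isIn_eq]
  have hj : ("\n" : String).toList = ['\n'] := rfl
  rw [PySem.Str.toList_join, hj, pv_isIn_join hne hc, List.map_map, List.any_map, List.any_filter]
  congr 1

-- ===== VERDICT (by name: the statement is the Claim_ definition above) =====
theorem has_all_tokens_py_spec : Claim_equal_has_all_tokens_py := by
  intro content _
  unfold Spec_has_all_tokens_py has_all_tokens_py has_all_tokens_py_alt
  rw [pv_foldA, pv_foldB]
  simp only [List.nil_append, List.all_cons, List.all_nil, Bool.false_or, Bool.and_true]
  rw [pv_tok _ "developer" (by decide) (by decide),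
    pv_tok _ "+ixsLog" (by decide) (by decide),
    pv_tok _ "+cxsLog" (by decide) (by decide), Bool.and_assoc]
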